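-- pv_equiv track=rewrite | github.com/acheunce/CS303E | MockExam2.py | essayCharacterCount
-- ===== SOURCE A (Python) =====
-- def essayCharacterCount(sentence, words):
--     # replace pass with your solution to problem 3 here
--     sentence = sentence + " "
--     count = 0
--     sentence_list = []
--     starting_index = 0
--     for i in range(len(sentence)):
--         if sentence[i] == " ":
--             sentence_list += [sentence[starting_index:i]]
--             starting_index = i + 1
--
--     for word in sentence_list:
--         if word.lower() not in words:
--             count += len(word)
--     return count
-- ===== SOURCE B (Python) =====
-- def essayCharacterCount(sentence, words):
--     # single pass: keep a running word and add its length at each space / at the end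
--     count = 0
--     current = ""
--     for ch in sentence:
--         if ch == " ":
--             if current.lower() not in words:
--                 count += len(current)
--             current = ""
--         else:
--             current += ch
--     if current.lower() not in words:
--         count += len(current)
--     return count
-- ===== Notes on version B (the rewrite author's own statement) =====
-- stated objective: simpler
-- what changed: A appends a space, scans indices to build a token list via slices and then sums lengths in a second pass; B does one pass over the characters with a running current word and a running count, never materializing the token list.
import Mathlib
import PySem

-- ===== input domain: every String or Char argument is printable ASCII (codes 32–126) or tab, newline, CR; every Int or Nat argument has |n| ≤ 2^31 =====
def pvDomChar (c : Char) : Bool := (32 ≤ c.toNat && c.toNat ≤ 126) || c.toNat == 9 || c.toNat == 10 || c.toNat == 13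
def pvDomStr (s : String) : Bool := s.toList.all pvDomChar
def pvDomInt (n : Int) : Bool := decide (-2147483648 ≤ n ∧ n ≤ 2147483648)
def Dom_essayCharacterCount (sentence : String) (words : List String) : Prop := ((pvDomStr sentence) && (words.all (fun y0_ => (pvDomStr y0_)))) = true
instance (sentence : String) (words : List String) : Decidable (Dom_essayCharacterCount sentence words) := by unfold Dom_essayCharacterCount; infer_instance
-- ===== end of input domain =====

-- B fuses A's append-space / index-scan tokenisation + second summing pass into one
-- character pass with a running word and count (objective: simpler; same O(n) cost).

-- ===== PORT A =====
-- A's index loop pushing sentence[starting_index:i] at each space; the index i is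
-- always in range, so Python's sentence[i] is ported as pyGetD with an unreachable default.
def stepA (s : List Char) (st : List (List Char) × Int) (i : Int) : List (List Char) × Int :=
  if PySem.List.pyGetD s i ' ' = ' ' then
    (st.1 ++ [PySem.List.slice s (some st.2) (some i)], i + 1)
  else st

def essayCharacterCount (sentence : String) (words : List String) : Int :=
  let s : List Char := sentence.toList ++ [' ']        -- sentence = sentence + " "
  let ws : List (List Char) := words.map String.toList -- string equality = char-list equality
  let lst := ((PySem.List.pyRange 0 s.length 1).foldl (stepA s) ([], 0)).1
  lst.foldl (fun (count : Int) (word : List Char) =>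
      if PySem.Chars.lower word ∈ ws then count else count + word.length) 0

-- ===== PORT B =====
def stepB (ws : List (List Char)) (st : Int × List Char) (c : Char) : Int × List Char :=
  if c = ' ' then
    ((if PySem.Chars.lower st.2 ∈ ws then st.1 else st.1 + st.2.length), [])
  else (st.1, st.2 ++ [c])

-- the trailing 'if current.lower() not in words: count += len(current)'
def finishB (ws : List (List Char)) (st : Int × List Char) : Int :=
  if PySem.Chars.lower st.2 ∈ ws then st.1 else st.1 + st.2.length

def essayCharacterCount_alt (sentence : String) (words : List String) : Int :=
  let ws : List (List Char) := words.map String.toList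
  finishB ws (sentence.toList.foldl (stepB ws) (0, []))

-- ===== PRECONDITION & SPEC =====
def Spec_essayCharacterCount (sentence : String) (words : List String) (out : Int) : Prop := out = essayCharacterCount_alt sentence words
instance (sentence : String) (words : List String) (out : Int) : Decidable (Spec_essayCharacterCount sentence words out) := by unfold Spec_essayCharacterCount; infer_instance

-- ===== CLAIM (what is proved, stated in full; the proofs are below) =====
def Claim_equal_essayCharacterCount : Prop := ∀ (sentence : String) (words : List String), Dom_essayCharacterCount sentence words → Spec_essayCharacterCount sentence words (essayCharacterCount sentence words)

-- ===== LEMMAS AND PROOFS =====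

-- split on the literal space, Python-style (trailing/leading/adjacent spaces give empty tokens)
def splitSp : List Char → List (List Char)
  | [] => [[]]
  | c :: cs =>
    if c = ' ' then [] :: splitSp cs
    else match splitSp cs with
      | [] => [[c]]
      | t :: ts => (c :: t) :: ts

-- a token's contribution to the count
def tokVal (ws : List (List Char)) (w : List Char) : Int :=
  if PySem.Chars.lower w ∈ ws then 0 else w.length

lemma splitSp_ne_nil (cs : List Char) : splitSp cs ≠ [] := by
  cases cs with
  | nil => simp [splitSp]
  | cons c cs =>
    simp only [splitSp]
    split
    · simp
    · split <;> simp

lemma splitSp_no_space (pre : List Char) (h : ∀ c ∈ pre, c ≠ ' ') : splitSp pre = [pre] := by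
  induction pre with
  | nil => rfl
  | cons c cs ih =>
    have hc : c ≠ ' ' := h c (by simp)
    have := ih (fun x hx => h x (by simp [hx]))
    simp [splitSp, hc, this]

lemma splitSp_append_space (pre rest : List Char) (h : ∀ c ∈ pre, c ≠ ' ') :
    splitSp (pre ++ ' ' :: rest) = pre :: splitSp rest := by
  induction pre with
  | nil => simp [splitSp]
  | cons c cs ih =>
    have hc : c ≠ ' ' := h c (by simp)
    have hih := ih (fun x hx => h x (by simp [hx]))
    simp [List.cons_append, splitSp, hc, hih]

lemma splitSp_trailing (t : List Char) : splitSp (t ++ [' ']) = splitSp t ++ [[]] := by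
  induction t with
  | nil => simp [splitSp]
  | cons c cs ih =>
    by_cases hc : c = ' '
    · simp [splitSp, hc, ih]
    · have hne := splitSp_ne_nil cs
      simp only [List.cons_append, splitSp, if_neg hc, ih]
      cases h : splitSp cs with
      | nil => exact absurd h hne
      | cons t ts => simp

lemma dropLast_trailing (t : List Char) : (splitSp (t ++ [' '])).dropLast = splitSp t := by
  simp [splitSp_trailing]

-- A's second loop is the sum of tokVal over the token list
lemma sum_loop (ws : List (List Char)) (lst : List (List Char)) (c : Int) :
    lst.foldl (fun (count : Int) (word : List Char) =>
      if PySem.Chars.lower word ∈ ws then count else count + word.length) c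
    = c + (lst.map (tokVal ws)).sum := by
  induction lst generalizing c with
  | nil => simp
  | cons w l ih =>
    simp only [List.foldl_cons, List.map_cons, List.sum_cons, ih, tokVal]
    split <;> ring

-- B's loop invariant: a space-free running word plus the rest of the input
lemma B_fold (ws : List (List Char)) (cs : List Char) :
    ∀ (count : Int) (cur : List Char), (∀ c ∈ cur, c ≠ ' ') →
    finishB ws (cs.foldl (stepB ws) (count, cur))
      = count + ((splitSp (cur ++ cs)).map (tokVal ws)).sum := by
  induction cs with
  | nil =>
    intro count cur h
    simp [finishB, splitSp_no_space cur h, tokVal]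
    split <;> simp
  | cons c cs ih =>
    intro count cur h
    by_cases hc : c = ' '
    · subst hc
      simp only [List.foldl_cons, stepB, if_true]
      rw [ih _ [] (by simp), splitSp_append_space cur cs h]
      simp only [List.map_cons, List.sum_cons, tokVal]
      split <;> simp [add_assoc]
    · simp only [List.foldl_cons, stepB, if_neg hc]
      rw [ih count (cur ++ [c]) (by intro x hx; rcases List.mem_append.mp hx with h1 | h1
                                    · exact h x h1
                                    · simpa using (by simpa using h1) ▸ hc)]
      simp

-- A's tokenising loop: fuel induction over the remaining indices
lemma A_fold (s : List Char) : ∀ (m k p : Nat) (lst : List (List Char)),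
    k + m = s.length → p ≤ k →
    (∀ c ∈ (s.drop p).take (k - p), c ≠ ' ') →
    ((PySem.List.pyRange (k : Int) (s.length : Int) 1).foldl (stepA s) (lst, (p : Int))).1
      = lst ++ (splitSp (s.drop p)).dropLast := by
  intro m
  induction m with
  | zero =>
    intro k p lst hm hpk hfree
    have hk : k = s.length := by omega
    rw [PySem.List.pyRange_one_eq_nil (by omega)]
    have hall : ∀ c ∈ s.drop p, c ≠ ' ' := by
      intro c hc
      apply hfree
      have : (s.drop p).length = k - p := by simp [hk]
      rw [← this, List.take_length]; exact hc
    simp [splitSp_no_space _ hall]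
  | succ m ih =>
    intro k p lst hm hpk hfree
    have hk : k < s.length := by omega
    rw [PySem.List.pyRange_one_cons (by exact_mod_cast hk)]
    simp only [List.foldl_cons, stepA]
    have hget : PySem.List.pyGetD s (k : Int) ' ' = s[k] := by
      rw [PySem.List.pyGetD_natCast]
      exact List.getD_eq_getElem s ' ' hk
    by_cases hsp : s[k] = ' '
    · rw [if_pos (by rw [hget, hsp])]
      have hslice : PySem.List.slice s (some (p : Int)) (some (k : Int))
          = (s.drop p).take (k - p) := PySem.List.slice_natCast s p k
      have hcast : (k : Int) + 1 = ((k + 1 : Nat) : Int) := by push_cast; ring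
      rw [hslice, hcast, ih (k + 1) (k + 1) _ (by omega) le_rfl (by simp)]
      set u := (s.drop p).take (k - p) with hu
      have hdecomp : s.drop p = u ++ ' ' :: s.drop (k + 1) := by
        conv_lhs => rw [← List.take_append_drop (k - p) (s.drop p)]
        rw [← hu]
        congr 1
        rw [List.drop_drop]
        have hpk' : p + (k - p) = k := by omega
        rw [hpk', List.drop_eq_getElem_cons hk, hsp]
      rw [hdecomp, splitSp_append_space _ _ hfree]
      have hne := splitSp_ne_nil (s.drop (k + 1))
      cases hsplit : splitSp (s.drop (k + 1)) with
      | nil => exact absurd hsplit hne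
      | cons t ts => simp
    · rw [if_neg (by rw [hget]; exact hsp)]
      apply ih (k + 1) p lst (by omega) (by omega)
      intro c hc
      have hlen : p + (k - p) < s.length := by omega
      have htake : (s.drop p).take (k + 1 - p) = (s.drop p).take (k - p) ++ [s[k]] := by
        have h1 : k + 1 - p = (k - p) + 1 := by omega
        rw [h1, List.take_add_one, List.getElem?_drop]
        have h2 : p + (k - p) = k := by omega
        rw [h2, List.getElem?_eq_getElem hk]
        rfl
      rw [htake] at hc
      rcases List.mem_append.mp hc with h1 | h1
      · exact hfree c h1
      · simpa using (by simpa using h1 : c = s[k]) ▸ hsp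

-- ===== VERDICT (by name: the statement is the Claim_ definition above) =====
theorem essayCharacterCount_spec : Claim_equal_essayCharacterCount := by
  intro sentence words _
  unfold Spec_essayCharacterCount essayCharacterCount essayCharacterCount_alt
  dsimp only
  have hA := A_fold (sentence.toList ++ [' ']) (sentence.toList ++ [' ']).length 0 0 []
    (by simp) (Nat.zero_le _) (by simp)
  simp only [Nat.cast_zero, List.drop_zero, List.nil_append] at hA
  rw [hA, dropLast_trailing, sum_loop]
  rw [B_fold (words.map String.toList) sentence.toList 0 [] (by simp)]
  simp
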